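-- pv_equiv track=rewrite | github.com/deurquizajuancruz/Advent-of-Code | 2024/Day2/part2.py | check_removing
-- ===== SOURCE A (Python) =====
-- def check_removing(arrayNumber: list) -> bool:
--     for remove_position in range(len(arrayNumber)):
--         removed: int = arrayNumber.pop(remove_position)
--         is_safe: bool = all(
--             arrayNumber[i] < arrayNumber[i + 1] for i in range(len(arrayNumber) - 1)
--         ) or all(
--             arrayNumber[i] > arrayNumber[i + 1] for i in range(len(arrayNumber) - 1)
--         )
--         i: int = 0
--         while i < len(arrayNumber) - 1 and is_safe:
--             difference: int = abs(arrayNumber[i] - arrayNumber[i + 1])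
--             if difference < 1 or difference > 3:
--                 is_safe = False
--             i += 1
--         if is_safe:
--             return True
--         arrayNumber.insert(remove_position, removed)
--     return False
-- ===== SOURCE B (Python) =====
-- def _ok(a, b, s):
--     d = (b - a) * s
--     return 1 <= d <= 3
--
-- def _safe(xs, s):
--     return all(_ok(xs[i], xs[i + 1], s) for i in range(len(xs) - 1))
--
-- def _dir(xs, s):
--     j = next((i for i in range(len(xs) - 1) if not _ok(xs[i], xs[i + 1], s)), None)
--     if j is None:
--         return True
--     return _safe(xs[:j] + xs[j + 1:], s) or _safe(xs[:j + 1] + xs[j + 2:], s)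
--
-- def check_removing(arrayNumber: list) -> bool:
--     if not arrayNumber:
--         return False
--     return _dir(arrayNumber, 1) or _dir(arrayNumber, -1)
-- ===== Notes on version B (the rewrite author's own statement) =====
-- stated objective: faster
-- what changed: Instead of trying every deletion position and rescanning the whole list each time, B makes one pass per direction to find the first violating adjacent pair and tests only the two local deletions (delete its left or right element), plus the no-violation case.
import Mathlib
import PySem

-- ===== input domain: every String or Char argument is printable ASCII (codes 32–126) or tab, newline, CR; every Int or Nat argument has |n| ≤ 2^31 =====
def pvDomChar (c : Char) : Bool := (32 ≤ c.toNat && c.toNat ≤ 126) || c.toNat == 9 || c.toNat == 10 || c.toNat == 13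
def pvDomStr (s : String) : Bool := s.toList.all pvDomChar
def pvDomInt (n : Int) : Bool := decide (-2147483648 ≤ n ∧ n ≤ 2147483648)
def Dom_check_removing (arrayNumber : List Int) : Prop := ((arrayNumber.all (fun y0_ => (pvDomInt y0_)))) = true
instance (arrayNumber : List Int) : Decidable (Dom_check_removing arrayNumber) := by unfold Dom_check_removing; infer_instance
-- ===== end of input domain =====

-- B replaces A's try-every-deletion O(n^2) scan by a single pass per direction: find the
-- first violating adjacent pair and test only the two local deletions (objective: faster).
-- Python A mutates its argument (on a True return the popped element stays removed);
-- the equivalence proved here is about the RETURN value only; B does not mutate.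

-- ===== PORT A =====
-- inner `all(...) or all(...)` over range(len-1) (indices are in range, so getD is exact)
def aSafe0 (xs : List Int) : Bool :=
  ((List.range (xs.length - 1)).all fun i => decide (xs.getD i 0 < xs.getD (i + 1) 0)) ||
  ((List.range (xs.length - 1)).all fun i => decide (xs.getD i 0 > xs.getD (i + 1) 0))

-- the `while i < len - 1 and is_safe` loop, step for step (difference = abs(xs[i]-xs[i+1]))
def aWhile (xs : List Int) (i : Nat) (s : Bool) : Bool :=
  if _h : i < xs.length - 1 ∧ s = true then
    aWhile xs (i + 1)
      (if (xs.getD i 0 - xs.getD (i + 1) 0).natAbs < 1 ∨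
          (xs.getD i 0 - xs.getD (i + 1) 0).natAbs > 3 then false else s)
  else s
termination_by xs.length - 1 - i
decreasing_by omega

-- the outer for-loop: pop(remove_position) then insert it back restores the list, so each
-- iteration tests eraseIdx of the original; the early `return True` is `.any` over range(len)
def check_removing (arrayNumber : List Int) : Bool :=
  (List.range arrayNumber.length).any fun remove_position =>
    let removed := arrayNumber.eraseIdx remove_position
    aWhile removed 0 (aSafe0 removed)

-- ===== PORT B =====
def okB (a b s : Int) : Bool := decide (1 ≤ (b - a) * s) && decide ((b - a) * s ≤ 3)

def safeB (xs : List Int) (s : Int) : Bool :=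
  (List.range (xs.length - 1)).all fun i => okB (xs.getD i 0) (xs.getD (i + 1) 0) s

-- next((i for i in range(len-1) if not _ok(...)), None)
def firstB (xs : List Int) (s : Int) : Option Nat :=
  (List.range (xs.length - 1)).find? fun i => ! okB (xs.getD i 0) (xs.getD (i + 1) 0) s

-- xs[:j] + xs[j+1:] is take j ++ drop (j+1) (nonnegative slice bounds, exact)
def dirB (xs : List Int) (s : Int) : Bool :=
  match firstB xs s with
  | none => true
  | some j =>
      safeB (xs.take j ++ xs.drop (j + 1)) s || safeB (xs.take (j + 1) ++ xs.drop (j + 2)) s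

def check_removing_alt (arrayNumber : List Int) : Bool :=
  if arrayNumber = [] then false
  else dirB arrayNumber 1 || dirB arrayNumber (-1)

-- ===== PRECONDITION & SPEC =====
def Spec_check_removing (arrayNumber : List Int) (out : Bool) : Prop := out = check_removing_alt arrayNumber
instance (arrayNumber : List Int) (out : Bool) : Decidable (Spec_check_removing arrayNumber out) := by unfold Spec_check_removing; infer_instance

-- ===== CLAIM (what is proved, stated in full; the proofs are below) =====
def Claim_equal_check_removing : Prop := ∀ (arrayNumber : List Int), Dom_check_removing arrayNumber → Spec_check_removing arrayNumber (check_removing arrayNumber)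

-- ===== LEMMAS AND PROOFS =====

-- characterisation of the while loop: it returns s ∧ every remaining difference is in [1,3]
theorem aWhile_eq (xs : List Int) (i : Nat) (s : Bool) :
    aWhile xs i s =
      (s && decide (∀ k < xs.length - 1, i ≤ k →
        1 ≤ (xs.getD k 0 - xs.getD (k + 1) 0).natAbs ∧
        (xs.getD k 0 - xs.getD (k + 1) 0).natAbs ≤ 3)) := by
  fun_induction aWhile xs i s with
  | case1 i s h ih =>
      obtain ⟨hi, hs⟩ := h
      subst hs
      simp only [dite_eq_ite] at ih
      rw [ih]
      by_cases hd : (xs.getD i 0 - xs.getD (i + 1) 0).natAbs < 1 ∨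
          (xs.getD i 0 - xs.getD (i + 1) 0).natAbs > 3
      · rw [if_pos hd]
        simp only [Bool.false_and, Bool.true_and]
        symm
        rw [decide_eq_false_iff_not]
        intro hall
        have := hall i hi (le_refl i)
        omega
      · rw [if_neg hd]
        simp only [Bool.true_and]
        rw [decide_eq_decide]
        constructor
        · intro hall k hk hik
          rcases Nat.eq_or_lt_of_le hik with rfl | hlt
          · omega
          · exact hall k hk hlt
        · intro hall k hk hik
          exact hall k hk (by omega)
  | case2 i s h =>
      cases s with
      | false => simp
      | true =>
        have hi : ¬ i < xs.length - 1 := fun hh => h ⟨hh, rfl⟩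
        simp only [Bool.true_and]
        symm
        rw [decide_eq_true_eq]
        intro k hk hik
        omega

-- the per-deletion safety test of A equals B's per-direction test
theorem aCheck_eq (xs : List Int) :
    aWhile xs 0 (aSafe0 xs) = (safeB xs 1 || safeB xs (-1)) := by
  rw [aWhile_eq, Bool.eq_iff_iff]
  simp only [aSafe0, safeB, okB, Bool.or_eq_true, Bool.and_eq_true, List.all_eq_true,
    List.mem_range, decide_eq_true_eq, mul_one, mul_neg_one]
  constructor
  · rintro ⟨hmono | hmono, habs⟩
    · left
      intro i hi
      have h1 := hmono i hi
      have h2 := habs i hi (Nat.zero_le i)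
      omega
    · right
      intro i hi
      have h1 := hmono i hi
      have h2 := habs i hi (Nat.zero_le i)
      omega
  · rintro (hs | hs)
    · exact ⟨Or.inl fun i hi => by have := hs i hi; omega,
        fun k hk _ => by have := hs k hk; omega⟩
    · exact ⟨Or.inr fun i hi => by have := hs i hi; omega,
        fun k hk _ => by have := hs k hk; omega⟩

theorem getD_eraseIdx (xs : List Int) (k i : Nat) (h : i + 1 < xs.length) :
    (xs.eraseIdx k).getD i 0 = if i < k then xs.getD i 0 else xs.getD (i + 1) 0 := by
  by_cases hk : k < xs.length
  · have hlen : (xs.eraseIdx k).length = xs.length - 1 := by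
      rw [List.length_eraseIdx]; simp [hk]
    by_cases hik : i < k
    · rw [if_pos hik]
      rw [List.getD_eq_getElem _ _ (by omega), List.getD_eq_getElem _ _ (by omega),
        List.getElem_eraseIdx]
      simp [hik]
    · rw [if_neg hik]
      rw [List.getD_eq_getElem _ _ (by omega), List.getD_eq_getElem _ _ h,
        List.getElem_eraseIdx]
      simp [hik]
  · rw [List.eraseIdx_of_length_le (by omega)]
    rw [if_pos (by omega)]

theorem safeB_iff (xs : List Int) (s : Int) :
    safeB xs s = true ↔
      ∀ i < xs.length - 1, okB (xs.getD i 0) (xs.getD (i + 1) 0) s = true := by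
  unfold safeB
  rw [List.all_eq_true]
  constructor
  · intro hall i hi
    exact hall i (List.mem_range.mpr hi)
  · intro hall i hi
    exact hall i (List.mem_range.mp hi)

-- main lemma: B's local test per direction equals "some single deletion is safe"
theorem dirB_eq_any (xs : List Int) (s : Int) (hne : xs ≠ []) :
    (dirB xs s = true) ↔ (∃ k < xs.length, safeB (xs.eraseIdx k) s = true) := by
  have hn : 0 < xs.length := List.length_pos_iff.mpr hne
  unfold dirB
  cases hf : firstB xs s with
  | none =>
      simp only [true_iff]
      -- no violation: the whole list is safe, so deleting the last element is safe
      have hall : ∀ i < xs.length - 1, okB (xs.getD i 0) (xs.getD (i + 1) 0) s = true := by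
        intro i hi
        have := List.find?_eq_none.mp hf i (List.mem_range.mpr hi)
        simpa using this
      refine ⟨xs.length - 1, by omega, (safeB_iff _ s).mpr ?_⟩
      have hlen : (xs.eraseIdx (xs.length - 1)).length = xs.length - 1 := by
        rw [List.length_eraseIdx]; simp [Nat.sub_lt hn]
      intro i hi
      rw [hlen] at hi
      rw [getD_eraseIdx _ _ _ (by omega), getD_eraseIdx _ _ _ (by omega),
        if_pos (by omega), if_pos (by omega)]
      exact hall i (by omega)
  | some j =>
      dsimp only
      have hj : j < xs.length - 1 := List.mem_range.mp (List.mem_of_find?_eq_some hf)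
      have hviol : okB (xs.getD j 0) (xs.getD (j + 1) 0) s = false := by
        have := List.find?_some hf
        simpa using this
      have e1 : xs.take j ++ xs.drop (j + 1) = xs.eraseIdx j :=
        (List.eraseIdx_eq_take_drop_succ xs j).symm
      have e2 : xs.take (j + 1) ++ xs.drop (j + 2) = xs.eraseIdx (j + 1) :=
        (List.eraseIdx_eq_take_drop_succ xs (j + 1)).symm
      rw [e1, e2]
      constructor
      · intro h
        rw [Bool.or_eq_true] at h
        rcases h with h' | h'
        · exact ⟨j, by omega, h'⟩
        · exact ⟨j + 1, by omega, h'⟩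
      · rintro ⟨k, hk, hsafe⟩
        rw [Bool.or_eq_true]
        -- the successful deletion must be at j or j+1: otherwise the violating pair survives
        by_cases hkj : k = j
        · left; rw [← hkj]; exact hsafe
        by_cases hkj1 : k = j + 1
        · right; rw [← hkj1]; exact hsafe
        exfalso
        have hlen : (xs.eraseIdx k).length = xs.length - 1 := by
          rw [List.length_eraseIdx]; simp [hk]
        have hget := (safeB_iff _ s).mp hsafe
        by_cases hkl : k < j
        · have hb : j - 1 < (xs.eraseIdx k).length - 1 := by rw [hlen]; omega
          have := hget (j - 1) hb
          rw [getD_eraseIdx _ _ _ (by omega), getD_eraseIdx _ _ _ (by omega)] at this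
          rw [if_neg (by omega), if_neg (by omega)] at this
          have hj1 : j - 1 + 1 = j := by omega
          rw [hj1] at this
          rw [hviol] at this
          exact Bool.false_ne_true this
        · -- k > j + 1
          have hkg : j + 1 < k := by omega
          have hb : j < (xs.eraseIdx k).length - 1 := by rw [hlen]; omega
          have := hget j hb
          rw [getD_eraseIdx _ _ _ (by omega), getD_eraseIdx _ _ _ (by omega)] at this
          rw [if_pos (by omega), if_pos (by omega)] at this
          rw [hviol] at this
          exact Bool.false_ne_true this

-- ===== VERDICT (by name: the statement is the Claim_ definition above) =====
theorem check_removing_spec : Claim_equal_check_removing := by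
  intro xs _hdom
  unfold Spec_check_removing
  by_cases hne : xs = []
  · subst hne
    simp [check_removing, check_removing_alt]
  · unfold check_removing check_removing_alt
    rw [if_neg hne]
    rw [Bool.eq_iff_iff]
    simp only [List.any_eq_true, List.mem_range, Bool.or_eq_true]
    constructor
    · rintro ⟨pos, hpos, hsafe⟩
      simp only [aCheck_eq, Bool.or_eq_true] at hsafe
      rcases hsafe with h | h
      · left; exact (dirB_eq_any xs 1 hne).mpr ⟨pos, hpos, h⟩
      · right; exact (dirB_eq_any xs (-1) hne).mpr ⟨pos, hpos, h⟩
    · rintro (h | h)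
      · obtain ⟨k, hk, hsafe⟩ := (dirB_eq_any xs 1 hne).mp h
        exact ⟨k, hk, by simp only [aCheck_eq, Bool.or_eq_true]; left; exact hsafe⟩
      · obtain ⟨k, hk, hsafe⟩ := (dirB_eq_any xs (-1) hne).mp h
        exact ⟨k, hk, by simp only [aCheck_eq, Bool.or_eq_true]; right; exact hsafe⟩
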